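-- pv_equiv track=rewrite | github.com/lluc-palou/ap1-jutge | recursion/P43557.py | is_perfect_prime
-- ===== SOURCE A (Python) =====
-- def is_perfect_prime(n: int) -> bool:
--     """Determines if the given number is a perfect prime, in fact, the sum
--     of his digits is prime in any given moment."""
--
--     if n < 2:
--         return False
--
--     d = 2
--     while d * d <= n:
--         if n % d == 0:
--             return False
--         d = d + 1
--
--     if n < 10:
--         return True
--
--     return is_perfect_prime(digits_sum(n))
--
-- def digits_sum(n: int) -> int:
--     """Returns the sum of the digits of a given number."""
--
--     if n < 10:
--         return n
--     else:
--         return n % 10 + digits_sum(n // 10)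
-- ===== SOURCE B (Python) =====
-- def is_perfect_prime(n: int) -> bool:
--     """Iterative re-implementation: trial-division primality test plus an
--     explicit digit-sum loop instead of the double recursion."""
--
--     def is_prime(m: int) -> bool:
--         if m < 2:
--             return False
--         d = 2
--         while d * d <= m:
--             if m % d == 0:
--                 return False
--             d = d + 1
--         return True
--
--     while n >= 10:
--         if not is_prime(n):
--             return False
--         s = 0
--         m = n
--         while m > 0:
--             s = s + m % 10
--             m = m // 10
--         n = s
--     return is_prime(n)
-- ===== Notes on version B (the rewrite author's own statement) =====
-- stated objective: idiomatic
-- what changed: Replaces the tail recursion over the digit-sum chain (and the recursive digits_sum helper) by an explicit while-loop with an inner digit-sum loop and a separate is_prime helper.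
import Mathlib
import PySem

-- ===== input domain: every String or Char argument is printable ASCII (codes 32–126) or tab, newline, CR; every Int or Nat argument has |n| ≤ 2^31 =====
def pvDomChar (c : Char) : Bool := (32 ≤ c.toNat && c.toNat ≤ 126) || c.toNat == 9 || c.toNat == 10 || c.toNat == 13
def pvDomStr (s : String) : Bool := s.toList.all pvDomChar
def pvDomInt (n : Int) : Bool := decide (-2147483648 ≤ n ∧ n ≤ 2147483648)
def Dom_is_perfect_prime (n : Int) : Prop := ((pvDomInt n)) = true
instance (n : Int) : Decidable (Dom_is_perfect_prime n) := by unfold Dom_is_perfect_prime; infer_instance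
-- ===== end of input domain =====

-- B replaces A's double recursion (digit-sum chain + recursive digits_sum) by an explicit
-- loop with an inner digit-sum loop and an is_prime helper; same cost (idiomatic).
-- Fuel parameters only make the recursions structurally total; adequacy is proved below.

-- ===== PORT A =====

-- A's inner `while d * d <= n` loop: false on a divisor, true when the loop exits
def trialA : Nat → Int → Int → Bool
  | 0, _, _ => true
  | fuel + 1, n, d =>
    if d * d ≤ n then
      if PySem.Int.mod n d = 0 then false
      else trialA fuel n (d + 1)
    else true

-- A's recursive digits_sum helper
def digits_sumF : Nat → Int → Int
  | 0, n => n
  | fuel + 1, n =>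
    if n < 10 then n
    else PySem.Int.mod n 10 + digits_sumF fuel (PySem.Int.floordiv n 10)

def digits_sum (n : Int) : Int := digits_sumF n.toNat n

def perfF : Nat → Int → Bool
  | 0, _ => false
  | fuel + 1, n =>
    if n < 2 then false
    else if trialA (n.toNat + 1) n 2 = false then false
    else if n < 10 then true
    else perfF fuel (digits_sum n)

def is_perfect_prime (n : Int) : Bool := perfF (n.toNat + 1) n

-- ===== PORT B =====

-- B's `while d * d <= m` loop inside is_prime
def trialB : Nat → Int → Int → Bool
  | 0, _, _ => true
  | fuel + 1, m, d =>
    if d * d ≤ m then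
      if PySem.Int.mod m d = 0 then false
      else trialB fuel m (d + 1)
    else true

def is_prime (m : Int) : Bool :=
  if m < 2 then false
  else trialB (m.toNat + 1) m 2

-- B's inner `while m > 0` digit-sum loop
def sumLoopF : Nat → Int → Int → Int
  | 0, _, s => s
  | fuel + 1, m, s =>
    if 0 < m then sumLoopF fuel (PySem.Int.floordiv m 10) (s + PySem.Int.mod m 10)
    else s

-- B's outer `while n >= 10` loop
def altLoopF : Nat → Int → Bool
  | 0, _ => false
  | fuel + 1, n =>
    if 10 ≤ n then
      if is_prime n = false then false
      else altLoopF fuel (sumLoopF n.toNat n 0)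
    else is_prime n

def is_perfect_prime_alt (n : Int) : Bool := altLoopF (n.toNat + 1) n

-- ===== PRECONDITION & SPEC =====
def Spec_is_perfect_prime (n : Int) (out : Bool) : Prop := out = is_perfect_prime_alt n
instance (n : Int) (out : Bool) : Decidable (Spec_is_perfect_prime n out) := by unfold Spec_is_perfect_prime; infer_instance

-- ===== CLAIM (what is proved, stated in full; the proofs are below) =====
def Claim_equal_is_perfect_prime : Prop := ∀ (n : Int), Dom_is_perfect_prime n → Spec_is_perfect_prime n (is_perfect_prime n)

-- ===== LEMMAS AND PROOFS =====

-- the two trial-division loops are the same function of (fuel, bound, divisor)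
theorem trial_eq (f : Nat) : ∀ (n d : Int), trialA f n d = trialB f n d := by
  induction f with
  | zero => intro n d; rfl
  | succ f ih =>
    intro n d
    rw [trialA, trialB]
    split_ifs with h1 h2
    · rfl
    · exact ih n (d + 1)
    · rfl

-- digits_sumF does not depend on the fuel once the fuel is adequate
theorem digits_sumF_fuel (a : Nat) : ∀ (x : Int) (b : Nat), x.toNat ≤ a → x.toNat ≤ b →
    digits_sumF a x = digits_sumF b x := by
  induction a with
  | zero =>
    intro x b _ _
    have hx : x < 10 := by omega
    cases b with
    | zero => rfl
    | succ c => simp [digits_sumF, hx]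
  | succ a ih =>
    intro x b ha hb
    by_cases hx : x < 10
    · cases b with
      | zero => simp [digits_sumF, hx]
      | succ c => simp [digits_sumF, hx]
    · have hb1 : ∃ c, b = c + 1 := by
        cases b with
        | zero => exfalso; omega
        | succ c => exact ⟨c, rfl⟩
      obtain ⟨c, rfl⟩ := hb1
      rw [digits_sumF, if_neg hx, digits_sumF, if_neg hx]
      rw [PySem.Int.floordiv_eq_ediv_of_pos (by norm_num)]
      have hlt : (x / 10).toNat < x.toNat := by omega
      rw [ih (x / 10) c (by omega) (by omega)]

theorem digits_sumF_bounds (f : Nat) : ∀ (x : Int), 0 ≤ x → 0 ≤ digits_sumF f x ∧ digits_sumF f x ≤ x := by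
  induction f with
  | zero => intro x hx; rw [digits_sumF]; omega
  | succ f ih =>
    intro x hx
    rw [digits_sumF]
    split_ifs with hx10
    · omega
    · rw [PySem.Int.floordiv_eq_ediv_of_pos (by norm_num), PySem.Int.mod_eq_emod_of_pos (by norm_num)]
      have h1 := ih (x / 10) (by omega)
      omega

theorem digits_sum_bounds (n : Int) (h : 0 ≤ n) : 0 ≤ digits_sum n ∧ digits_sum n ≤ n :=
  digits_sumF_bounds n.toNat n h

theorem digits_sum_lt (n : Int) (h : 10 ≤ n) : digits_sum n < n := by
  unfold digits_sum
  have h1 : ∃ k, n.toNat = k + 1 := ⟨n.toNat - 1, by omega⟩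
  obtain ⟨k, hk⟩ := h1
  rw [hk, digits_sumF, if_neg (by omega)]
  rw [PySem.Int.floordiv_eq_ediv_of_pos (by norm_num), PySem.Int.mod_eq_emod_of_pos (by norm_num)]
  have h2 := digits_sumF_bounds k (n / 10) (by omega)
  omega

-- B's digit-sum loop computes s + digits_sum m (on positive m, with adequate fuel)
theorem sumLoopF_eq (f : Nat) : ∀ (m s : Int), 0 < m → m.toNat ≤ f → sumLoopF f m s = s + digits_sum m := by
  induction f with
  | zero => intro m s hm hf; exfalso; omega
  | succ f ih =>
    intro m s hm hf
    rw [sumLoopF, if_pos hm]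
    rw [PySem.Int.floordiv_eq_ediv_of_pos (by norm_num), PySem.Int.mod_eq_emod_of_pos (by norm_num)]
    by_cases h10 : m < 10
    · have hz : m / 10 = 0 := by omega
      have hm10 : m % 10 = m := by omega
      rw [hz, hm10]
      have hs0 : ∀ g : Nat, sumLoopF g 0 (s + m) = s + m := by
        intro g; cases g with
        | zero => rfl
        | succ g => rw [sumLoopF, if_neg (by omega)]
      rw [hs0]
      unfold digits_sum
      have h1 : ∃ k, m.toNat = k + 1 := ⟨m.toNat - 1, by omega⟩
      obtain ⟨k, hk⟩ := h1
      rw [hk, digits_sumF, if_pos h10]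
    · have hpos : 0 < m / 10 := by omega
      have hlt : (m / 10).toNat < m.toNat := by omega
      rw [ih (m / 10) (s + m % 10) hpos (by omega)]
      unfold digits_sum
      have h1 : ∃ k, m.toNat = k + 1 := ⟨m.toNat - 1, by omega⟩
      obtain ⟨k, hk⟩ := h1
      conv_rhs => rw [hk, digits_sumF, if_neg (by omega)]
      rw [PySem.Int.floordiv_eq_ediv_of_pos (by norm_num), PySem.Int.mod_eq_emod_of_pos (by norm_num)]
      rw [digits_sumF_fuel (m / 10).toNat (m / 10) k (le_refl _) (by omega)]
      ring

-- main equivalence: with the same adequate fuel the two programs agree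
theorem main_eq (f : Nat) : ∀ (n : Int), n.toNat < f → perfF f n = altLoopF f n := by
  induction f with
  | zero => intro n hn; exfalso; omega
  | succ f ih =>
    intro n hn
    rw [perfF, altLoopF]
    by_cases h2 : n < 2
    · rw [if_pos h2, if_neg (by omega), is_prime, if_pos h2]
    · rw [if_neg h2]
      by_cases ht : trialA (n.toNat + 1) n 2 = false
      · rw [if_pos ht]
        have hp : is_prime n = false := by
          rw [is_prime, if_neg h2, ← trial_eq]; exact ht
        by_cases h10 : 10 ≤ n
        · rw [if_pos h10, hp, if_pos rfl]
        · rw [if_neg h10, hp]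
      · have htt : trialA (n.toNat + 1) n 2 = true := by
          cases hb : trialA (n.toNat + 1) n 2 with
          | false => exact absurd hb ht
          | true => rfl
        rw [if_neg ht]
        have hp : is_prime n = true := by
          rw [is_prime, if_neg h2, ← trial_eq]; exact htt
        by_cases h10 : n < 10
        · rw [if_pos h10, if_neg (by omega), hp]
        · rw [if_neg h10, if_pos (by omega), hp]
          simp only [Bool.true_eq_false, if_false]
          rw [sumLoopF_eq n.toNat n 0 (by omega) (le_refl _), zero_add]
          have hb := digits_sum_bounds n (by omega)
          have hl := digits_sum_lt n (by omega)
          exact ih (digits_sum n) (by omega)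

-- ===== VERDICT (by name: the statement is the Claim_ definition above) =====
theorem is_perfect_prime_spec : Claim_equal_is_perfect_prime := by
  intro n _
  unfold Spec_is_perfect_prime is_perfect_prime_alt is_perfect_prime
  exact main_eq (n.toNat + 1) n (by omega)
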